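-- pv_equiv track=rewrite | github.com/im-deepfriedwater/adventofcode2020 | day11/main.py | has_no_occupied_adjacents
-- ===== SOURCE A (Python) =====
-- def is_in_bounds(x, y, seat_chart):
--     return x >= 0 and x < len(seat_chart[0]) and y >= 0 and y < len(seat_chart)
--
-- def has_no_occupied_adjacents(x, y, seat_chart):
--     result = True
--
--     for delta in [[-1, -1], [-1, 0], [-1, 1], [0, -1], [0, 1], [1, -1], [1, 0], [1, 1]]:
--         x_to_check, y_to_check = delta[0] + x, delta[1] + y
--
--         if is_in_bounds(x_to_check, y_to_check, seat_chart) and seat_chart[y_to_check][x_to_check] == '#':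
--             result = False
--             break
--
--     return result
-- ===== SOURCE B (Python) =====
-- def has_no_occupied_adjacents(x, y, seat_chart):
--     occupied = 0
--     for row in seat_chart[max(0, y - 1):max(0, y + 2)]:
--         for ch in row[max(0, x - 1):max(0, x + 2)]:
--             if ch == '#':
--                 occupied += 1
--     if 0 <= y < len(seat_chart):
--         row = seat_chart[y]
--         if 0 <= x < len(row) and row[x] == '#':
--             occupied -= 1
--     return occupied == 0
-- ===== Notes on version B (the rewrite author's own statement) =====
-- stated objective: alternative
-- what changed: B slices a clipped 3x3 window out of the grid (rows seat_chart[max(0,y-1):max(0,y+2)], then columns likewise), counts the '#' characters in it and discounts the centre seat, instead of A's probing of eight fixed deltas through a bounds-check helper.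
-- outside the precondition, e.g. on has_no_occupied_adjacents(2, 1, ['#', '###']): A returns True, B returns False
import Mathlib
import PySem

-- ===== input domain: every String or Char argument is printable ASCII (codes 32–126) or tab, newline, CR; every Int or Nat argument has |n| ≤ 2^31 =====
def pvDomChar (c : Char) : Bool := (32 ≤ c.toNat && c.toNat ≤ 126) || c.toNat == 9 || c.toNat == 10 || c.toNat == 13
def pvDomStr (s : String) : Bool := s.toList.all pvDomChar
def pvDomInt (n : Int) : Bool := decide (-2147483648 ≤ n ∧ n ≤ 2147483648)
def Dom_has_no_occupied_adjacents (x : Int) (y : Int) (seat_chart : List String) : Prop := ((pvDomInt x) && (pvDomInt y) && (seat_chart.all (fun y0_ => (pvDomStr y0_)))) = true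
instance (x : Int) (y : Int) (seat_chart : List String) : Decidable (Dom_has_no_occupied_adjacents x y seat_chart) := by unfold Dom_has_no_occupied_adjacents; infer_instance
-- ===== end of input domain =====

-- B replaces A's eight-delta probing with bounds helper by slicing a clipped 3x3 window
-- out of the grid, counting its '#' characters and discounting the centre (objective:
-- alternative decomposition, same asymptotic cost).

-- ===== PORT A =====
def is_in_bounds (x : Int) (y : Int) (seat_chart : List String) : Bool :=
  decide (0 ≤ x) && decide (x < PySem.Str.len ((PySem.List.pyGet? seat_chart 0).getD "")) &&
  decide (0 ≤ y) && decide (y < (seat_chart.length : Int))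

def pvDeltas : List (Int × Int) := [(-1, -1), (-1, 0), (-1, 1), (0, -1), (0, 1), (1, -1), (1, 0), (1, 1)]

def pvLoopA (x : Int) (y : Int) (seat_chart : List String) : List (Int × Int) → Bool
  | [] => true
  | d :: rest =>
    let x_to_check := d.1 + x
    let y_to_check := d.2 + y
    if is_in_bounds x_to_check y_to_check seat_chart &&
       (((PySem.List.pyGet? seat_chart y_to_check).bind
           (fun row => PySem.Str.pyGet? row x_to_check)) == some '#')
    then false
    else pvLoopA x y seat_chart rest

def has_no_occupied_adjacents (x : Int) (y : Int) (seat_chart : List String) : Bool :=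
  pvLoopA x y seat_chart pvDeltas

-- ===== PORT B =====
def has_no_occupied_adjacents_alt (x : Int) (y : Int) (seat_chart : List String) : Bool :=
  let rows := PySem.List.slice seat_chart (some (max 0 (y - 1))) (some (max 0 (y + 2)))
  let occupied : Int := rows.foldl (fun acc row =>
    (PySem.Str.slice row (some (max 0 (x - 1))) (some (max 0 (x + 2)))).toList.foldl
      (fun acc2 ch => if ch == '#' then acc2 + 1 else acc2) acc) 0
  let occupied :=
    if decide (0 ≤ y) && decide (y < (seat_chart.length : Int)) then
      let row := (PySem.List.pyGet? seat_chart y).getD ""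
      if decide (0 ≤ x) && decide (x < (row.toList.length : Int)) &&
         (PySem.Str.pyGet? row x == some '#') then occupied - 1 else occupied
    else occupied
  occupied == 0

-- ===== PRECONDITION & SPEC =====
-- pvRowOk sc j: if row j exists, it is as long as row 0 (A measures every bound against row 0)
def pvRowOk (seat_chart : List String) (j : Int) : Prop :=
  0 ≤ j → j < (seat_chart.length : Int) →
    ((seat_chart[j.toNat]?).getD "").toList.length = ((seat_chart.headD "").toList.length)

-- Pre_ excludes the empty chart, on which A raises IndexError (seat_chart[0]), and charts
-- ragged inside the three-row band around y, where A's bounds check against row 0's width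
-- either raises IndexError on a shorter row or silently ignores cells of a longer row.
def Pre_has_no_occupied_adjacents (x : Int) (y : Int) (seat_chart : List String) : Prop :=
  seat_chart ≠ [] ∧ pvRowOk seat_chart (y - 1) ∧ pvRowOk seat_chart y ∧ pvRowOk seat_chart (y + 1)
instance (x : Int) (y : Int) (seat_chart : List String) : Decidable (Pre_has_no_occupied_adjacents x y seat_chart) := by unfold Pre_has_no_occupied_adjacents pvRowOk; infer_instance

def pvWitness_has_no_occupied_adjacents : Int × Int × List String := (0, 0, ["L#", ".."])

def Spec_has_no_occupied_adjacents (x : Int) (y : Int) (seat_chart : List String) (out : Bool) : Prop := out = has_no_occupied_adjacents_alt x y seat_chart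
instance (x : Int) (y : Int) (seat_chart : List String) (out : Bool) : Decidable (Spec_has_no_occupied_adjacents x y seat_chart out) := by unfold Spec_has_no_occupied_adjacents; infer_instance

-- ===== CLAIM (what is proved, stated in full; the proofs are below) =====
def Claim_equal_has_no_occupied_adjacents : Prop := ∀ (x : Int) (y : Int) (seat_chart : List String), Dom_has_no_occupied_adjacents x y seat_chart → Pre_has_no_occupied_adjacents x y seat_chart → Spec_has_no_occupied_adjacents x y seat_chart (has_no_occupied_adjacents x y seat_chart)

-- ===== LEMMAS AND PROOFS =====

-- `pvG cs t` = cs[t] as a total Int-indexed lookup (none when out of range, incl. negative).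
def pvG {α : Type} (cs : List α) (t : Int) : Option α :=
  if 0 ≤ t then cs[t.toNat]? else none

def pvOc {α : Type} (h : α → Int) : Option α → Int
  | some a => h a
  | none => 0

def pvCharAt (seat_chart : List String) (i j : Int) : Option Char :=
  (pvG seat_chart j).bind (fun r => pvG r.toList i)

def pvB (seat_chart : List String) (i j : Int) : Bool := pvCharAt seat_chart i j == some '#'

theorem pv_sum_take {α : Type} (h : α → Int) (cs : List α) (a : Nat) :
    ∀ k : Nat, (((cs.drop a).take k).map h).sum
      = ((List.range k).map (fun t => pvOc h cs[a + t]?)).sum := by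
  intro k
  induction k with
  | zero => simp
  | succ k ih =>
    rw [List.take_succ, List.map_append, List.sum_append, ih, List.range_succ,
        List.map_append, List.sum_append, List.getElem?_drop]
    cases hgk : cs[a + k]? <;> simp [pvOc, hgk]

theorem pv_window {α : Type} (h : α → Int) (cs : List α) (s : Int) :
    (((cs.drop (max 0 s).toNat).take ((max 0 (s + 3)).toNat - (max 0 s).toNat)).map h).sum
      = pvOc h (pvG cs s) + pvOc h (pvG cs (s + 1)) + pvOc h (pvG cs (s + 2)) := by
  by_cases hs : 0 ≤ s
  · have h3 : (max 0 (s + 3)).toNat - (max 0 s).toNat = 3 := by omega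
    rw [h3, pv_sum_take h cs]
    have e0 : (max 0 s).toNat + 0 = s.toNat := by omega
    have e1 : (max 0 s).toNat + 1 = (s + 1).toNat := by omega
    have e2 : (max 0 s).toNat + 2 = (s + 2).toNat := by omega
    simp [List.range_succ, e0, e1, e2, pvG, hs, (by omega : (0:Int) ≤ s + 1), (by omega : (0:Int) ≤ s + 2)]
    rw [(by omega : (s + (1:Int)).toNat = s.toNat + 1), (by omega : (s + (2:Int)).toNat = s.toNat + 2)]
    ring
  · by_cases h1 : s = -1
    · subst h1
      have h2 : (max 0 ((-1) + 3)).toNat - (max 0 (-1 : Int)).toNat = 2 := by omega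
      have h0 : (max 0 (-1 : Int)).toNat = 0 := by omega
      rw [h2, h0, pv_sum_take h cs]
      simp [List.range_succ, pvG, pvOc]
    · by_cases h2 : s = -2
      · subst h2
        have hk : (max 0 ((-2) + 3)).toNat - (max 0 (-2 : Int)).toNat = 1 := by omega
        have h0 : (max 0 (-2 : Int)).toNat = 0 := by omega
        rw [hk, h0, pv_sum_take h cs]
        simp [List.range_succ, pvG, pvOc]
      · have hk : (max 0 (s + 3)).toNat - (max 0 s).toNat = 0 := by omega
        rw [hk]
        have g0 : pvG cs s = none := by unfold pvG; rw [if_neg (by omega)]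
        have g1 : pvG cs (s + 1) = none := by unfold pvG; rw [if_neg (by omega)]
        have g2 : pvG cs (s + 2) = none := by unfold pvG; rw [if_neg (by omega)]
        simp [g0, g1, g2, pvOc]

theorem pv_countP_int (p : Char → Bool) (l : List Char) :
    ((l.countP p : Int)) = (l.map (fun c => if p c then (1:Int) else 0)).sum := by
  induction l with
  | nil => simp
  | cons c l ih => by_cases h : p c <;> simp [List.countP_cons, h, ih] <;> ring

-- the '#'-count of one row's clipped column window, as three atoms
theorem pv_row_expand (seat_chart : List String) (x j : Int) :
    pvOc (fun row => ((((row.toList.drop (max 0 (x-1)).toNat).take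
          ((max 0 (x + 2)).toNat - (max 0 (x-1)).toNat)).countP (fun c => c == '#') : Int)))
        (pvG seat_chart j)
      = (if pvB seat_chart (x-1) j then (1:Int) else 0)
        + (if pvB seat_chart x j then (1:Int) else 0)
        + (if pvB seat_chart (x+1) j then (1:Int) else 0) := by
  cases hg : pvG seat_chart j with
  | none => simp [pvOc, pvB, pvCharAt, hg]
  | some r =>
    have hx : (x - 1) + 3 = x + 2 := by ring
    simp only [pvOc, pvB, pvCharAt, hg, Option.bind_some]
    rw [pv_countP_int, ← hx, pv_window (fun c => if c == '#' then (1:Int) else 0) r.toList (x-1)]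
    have e1 : x - 1 + 1 = x := by ring
    have e2 : x - 1 + 2 = x + 1 := by ring
    rw [e1, e2]
    cases h1 : pvG r.toList (x-1) <;> cases h2 : pvG r.toList x <;> cases h3 : pvG r.toList (x+1) <;>
      simp [pvOc]

theorem pv_fin (a b c d e f g h i : Bool) :
    (if a then false else if d then false else if g then false else
     if b then false else if h then false else
     if c then false else if f then false else if i then false else true)
    = ((((if a then (1:Int) else 0) + (if b then (1:Int) else 0) + (if c then (1:Int) else 0))
        + ((if d then (1:Int) else 0) + (if e then (1:Int) else 0) + (if f then (1:Int) else 0))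
        + ((if g then (1:Int) else 0) + (if h then (1:Int) else 0) + (if i then (1:Int) else 0))
        - (if e then (1:Int) else 0)) == 0) := by
  revert a b c d e f g h i
  decide

theorem pv_d4 (p1 p2 p3 p4 : Prop) [Decidable p1] [Decidable p2] [Decidable p3] [Decidable p4] :
    (decide p1 && decide p2 && decide p3 && decide p4) = decide (p1 ∧ p2 ∧ p3 ∧ p4) := by
  by_cases h1 : p1 <;> by_cases h2 : p2 <;> by_cases h3 : p3 <;> by_cases h4 : p4 <;>
    simp [h1, h2, h3, h4]

theorem pv_c3_t (p q : Prop) [Decidable p] [Decidable q] (b : Bool)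
    (hp : p) (hq : q) (hb : b = true) : (decide p && decide q && b) = true := by
  simp [hp, hq, hb]

theorem pv_c3_f (p q : Prop) [Decidable p] [Decidable q] (b : Bool)
    (h : ¬(p ∧ q ∧ b = true)) : (decide p && decide q && b) = false := by
  by_cases hp : p <;> by_cases hq : q <;> cases b <;> simp [hp, hq] <;> tauto

-- under Pre_, A's guarded probe at (i, j) is exactly the atom pvB
theorem pv_bbit (seat_chart : List String) (i j : Int)
    (hne : seat_chart ≠ [])
    (hrect : pvRowOk seat_chart j) :
    (is_in_bounds i j seat_chart &&
      (((PySem.List.pyGet? seat_chart j).bind (fun row => PySem.Str.pyGet? row i)) == some '#'))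
    = pvB seat_chart i j := by
  have hW : PySem.Str.len ((PySem.List.pyGet? seat_chart 0).getD "") = ((seat_chart.headD "").toList.length : Int) := by
    cases seat_chart with
    | nil => exact absurd rfl hne
    | cons r0 rest => simp [PySem.List.pyGet?_zero_cons]
  by_cases hi : 0 ≤ i
  · by_cases hj : 0 ≤ j
    · by_cases hjH : j < (seat_chart.length : Int)
      · -- row j exists
        have hjn : j.toNat < seat_chart.length := by omega
        have hrow : PySem.List.pyGet? seat_chart j = some seat_chart[j.toNat] := by
          rw [PySem.List.pyGet?_of_nonneg _ hj, List.getElem?_eq_getElem hjn]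
        have hlen : (seat_chart[j.toNat]).toList.length = ((seat_chart.headD "").toList.length) := by
          have h := hrect hj hjH
          rwa [List.getElem?_eq_getElem hjn, Option.getD_some] at h
        have hgj : pvG seat_chart j = some seat_chart[j.toNat] := by
          unfold pvG; rw [if_pos hj, List.getElem?_eq_getElem hjn]
        have hchar : PySem.Str.pyGet? seat_chart[j.toNat] i = pvG (seat_chart[j.toNat]).toList i := by
          unfold pvG
          rw [if_pos hi]
          simp [PySem.List.pyGet?_of_nonneg _ hi]
        by_cases hiW : i < ((seat_chart.headD "").toList.length : Int)
        · have hb : is_in_bounds i j seat_chart = true := by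
            unfold is_in_bounds; rw [hW, pv_d4]
            exact decide_eq_true ⟨hi, hiW, hj, hjH⟩
          rw [hb]
          simp only [Bool.true_and, pvB, pvCharAt, hgj, hrow, Option.bind_some, hchar]
        · have hb : is_in_bounds i j seat_chart = false := by
            unfold is_in_bounds; rw [hW, pv_d4]
            exact decide_eq_false (fun h => hiW h.2.1)
          rw [hb]
          have : pvG (seat_chart[j.toNat]).toList i = none := by
            unfold pvG; rw [if_pos hi]
            apply List.getElem?_eq_none
            omega
          simp [pvB, pvCharAt, hgj, this]
      · have hb : is_in_bounds i j seat_chart = false := by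
          unfold is_in_bounds; rw [pv_d4]
          exact decide_eq_false (fun h => hjH h.2.2.2)
        have hgj : pvG seat_chart j = none := by
          unfold pvG; rw [if_pos hj]
          apply List.getElem?_eq_none
          omega
        have hrow : PySem.List.pyGet? seat_chart j = none := by
          rw [PySem.List.pyGet?_of_nonneg _ hj]
          apply List.getElem?_eq_none
          omega
        rw [hb]
        simp [pvB, pvCharAt, hgj, hrow]
    · have hb : is_in_bounds i j seat_chart = false := by
        unfold is_in_bounds; rw [pv_d4]
        exact decide_eq_false (fun h => hj h.2.2.1)
      have hgj : pvG seat_chart j = none := by unfold pvG; rw [if_neg hj]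
      rw [hb]
      simp [pvB, pvCharAt, hgj]
  · have hb : is_in_bounds i j seat_chart = false := by
      unfold is_in_bounds; rw [pv_d4]
      exact decide_eq_false (fun h => hi h.1)
    rw [hb]
    have : ∀ r : String, pvG r.toList i = none := fun r => by unfold pvG; rw [if_neg hi]
    simp [pvB, pvCharAt, this]

theorem pv_center (seat_chart : List String) (x y : Int) (occ : Int) :
    (if decide (0 ≤ y) && decide (y < (seat_chart.length : Int)) then
      let row := (PySem.List.pyGet? seat_chart y).getD ""
      if decide (0 ≤ x) && decide (x < (row.toList.length : Int)) &&
         (PySem.Str.pyGet? row x == some '#') then occ - 1 else occ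
    else occ) = occ - (if pvB seat_chart x y then 1 else 0) := by
  by_cases hy : 0 ≤ y
  · by_cases hyH : y < (seat_chart.length : Int)
    · have hyn : y.toNat < seat_chart.length := by omega
      have hrow : PySem.List.pyGet? seat_chart y = some seat_chart[y.toNat] := by
        rw [PySem.List.pyGet?_of_nonneg _ hy, List.getElem?_eq_getElem hyn]
      have hgy : pvG seat_chart y = some seat_chart[y.toNat] := by
        unfold pvG; rw [if_pos hy, List.getElem?_eq_getElem hyn]
      rw [if_pos (by simp [hy, hyH])]
      simp only [hrow, Option.getD_some]
      by_cases hx : 0 ≤ x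
      · by_cases hxW : x < ((seat_chart[y.toNat]).toList.length : Int)
        · have hxn : x.toNat < (seat_chart[y.toNat]).toList.length := by omega
          have hchar : PySem.Str.pyGet? seat_chart[y.toNat] x = some (seat_chart[y.toNat]).toList[x.toNat] := by
            simp [PySem.List.pyGet?_of_nonneg _ hx, List.getElem?_eq_getElem hxn]
          have hpvb : pvB seat_chart x y = ((seat_chart[y.toNat]).toList[x.toNat] == '#') := by
            simp only [pvB, pvCharAt, hgy, Option.bind_some]
            unfold pvG
            rw [if_pos hx, List.getElem?_eq_getElem hxn]
            cases h : ((seat_chart[y.toNat]).toList[x.toNat] == '#') <;> simp [h]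
          rw [hpvb]
          by_cases hc : ((seat_chart[y.toNat]).toList[x.toNat] == '#') = true
          · rw [if_pos (pv_c3_t _ _ _ hx hxW (by rw [hchar]; simp [hc])), if_pos hc]
          · rw [if_neg (by rw [pv_c3_f _ _ _ (fun h => by rw [hchar] at h; simp [hc] at h)]; simp), if_neg (by simp [hc])]
            simp
        · have hnone : ((seat_chart[y.toNat]).toList)[x.toNat]? = none := by
            apply List.getElem?_eq_none; omega
          have hpvb : pvB seat_chart x y = false := by
            simp only [pvB, pvCharAt, hgy, Option.bind_some]
            unfold pvG
            rw [if_pos hx, hnone]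
            rfl
          have hchar : PySem.Str.pyGet? seat_chart[y.toNat] x = none := by
            simp [PySem.List.pyGet?_of_nonneg _ hx, hnone]
          rw [hpvb, if_neg (by rw [pv_c3_f _ _ _ (fun h => by rw [hchar] at h; simp at h)]; simp)]
          simp
      · have hpvb : pvB seat_chart x y = false := by
          simp only [pvB, pvCharAt, hgy, Option.bind_some]
          unfold pvG
          rw [if_neg hx]
          rfl
        rw [hpvb, if_neg (by rw [pv_c3_f _ _ _ (fun h => hx h.1)]; simp)]
        simp
    · have hgy : pvG seat_chart y = none := by
        unfold pvG; rw [if_pos hy]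
        apply List.getElem?_eq_none; omega
      rw [if_neg (by simp [hyH])]
      simp [pvB, pvCharAt, hgy]
  · have hgy : pvG seat_chart y = none := by unfold pvG; rw [if_neg hy]
    rw [if_neg (by simp [hy])]
    simp [pvB, pvCharAt, hgy]

-- ===== VERDICT (by name: the statement is the Claim_ definition above) =====
theorem has_no_occupied_adjacents_spec : Claim_equal_has_no_occupied_adjacents := by
  intro x y sc _ hpre
  obtain ⟨hne, hr1, hr2, hr3⟩ := hpre
  unfold Spec_has_no_occupied_adjacents
  -- normalize B's side
  have h1 : (0:Int) ≤ max 0 (y - 1) := le_max_left _ _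
  have h2 : (0:Int) ≤ max 0 (y + 2) := le_max_left _ _
  have h3 : (0:Int) ≤ max 0 (x - 1) := le_max_left _ _
  have h4 : (0:Int) ≤ max 0 (x + 2) := le_max_left _ _
  have grow : ∀ row : String,
      ((PySem.Str.slice row (some (max 0 (x - 1))) (some (max 0 (x + 2)))).toList.countP (fun c => c == '#') : Int)
      = ((((row.toList.drop (max 0 (x-1)).toNat).take
          ((max 0 (x + 2)).toNat - (max 0 (x-1)).toNat)).countP (fun c => c == '#') : Int)) := by
    intro row
    rw [PySem.Str.toList_slice, PySem.Chars.slice_eq_listSlice, PySem.List.slice_toNat _ h3 h4]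
  simp only [has_no_occupied_adjacents_alt, PySem.List.foldl_if_add_one, PySem.List.foldl_add,
    zero_add, grow]
  rw [pv_center]
  rw [(by ring : y + 2 = (y - 1) + 3), PySem.List.slice_toNat _ h1 (by omega : (0:Int) ≤ max 0 ((y-1) + 3)),
      pv_window _ sc (y - 1)]
  rw [(by ring : y - 1 + 1 = y), (by ring : y - 1 + 2 = y + 1)]
  rw [pv_row_expand sc x (y - 1), pv_row_expand sc x y, pv_row_expand sc x (y + 1)]
  simp only [has_no_occupied_adjacents, pvDeltas, pvLoopA]
  rw [(by ring : (-1:Int) + x = x - 1), (by ring : (0:Int) + x = x), (by ring : (1:Int) + x = x + 1),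
      (by ring : (-1:Int) + y = y - 1), (by ring : (0:Int) + y = y), (by ring : (1:Int) + y = y + 1)]
  rw [pv_bbit sc (x - 1) (y - 1) hne hr1, pv_bbit sc (x - 1) y hne hr2,
      pv_bbit sc (x - 1) (y + 1) hne hr3, pv_bbit sc x (y - 1) hne hr1,
      pv_bbit sc x (y + 1) hne hr3, pv_bbit sc (x + 1) (y - 1) hne hr1,
      pv_bbit sc (x + 1) y hne hr2, pv_bbit sc (x + 1) (y + 1) hne hr3]
  exact pv_fin _ _ _ _ _ _ _ _ _
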